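-- pv_equiv track=rewrite | github.com/faraway-kapok/algorithmstudy | Manacher.py | manacherstring
-- ===== SOURCE A (Python) =====
-- def manacherstring(arr):
--     res = [0] * (1+2*len(arr))
--     index = 0
--     for i in range(len(res)):
--         if i & 1 == 0:
--             res[i] = "#"
--         else:
--             res[i] = arr[index]
--             index += 1
--     return res
-- ===== SOURCE B (Python) =====
-- def manacherstring(arr):
--     res = ["#"] * (1 + 2 * len(arr))
--     res[1::2] = arr
--     return res
-- ===== Notes on version B (the rewrite author's own statement) =====
-- stated objective: idiomatic
-- what changed: Prefills all 1+2n separator slots with the hash string and writes the array elements in bulk via the slice assignment res[1::2] = arr, removing the parity-checking index loop and the manual counter.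
import Mathlib
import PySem

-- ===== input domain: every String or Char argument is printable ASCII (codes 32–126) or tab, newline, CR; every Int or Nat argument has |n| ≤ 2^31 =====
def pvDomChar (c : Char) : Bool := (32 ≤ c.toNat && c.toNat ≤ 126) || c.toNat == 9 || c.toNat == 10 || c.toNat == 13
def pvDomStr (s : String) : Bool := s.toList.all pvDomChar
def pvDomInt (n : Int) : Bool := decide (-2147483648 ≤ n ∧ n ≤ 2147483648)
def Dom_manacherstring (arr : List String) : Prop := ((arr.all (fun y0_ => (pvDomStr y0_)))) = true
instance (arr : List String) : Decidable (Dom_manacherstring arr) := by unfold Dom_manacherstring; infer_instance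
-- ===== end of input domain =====

-- B replaces A's parity-checking index loop with a prefilled hash buffer of length 1+2n and a bulk
-- slice assignment of the elements into the odd slots (objective: idiomatic).

-- ===== PORT A =====
-- A's loop over range(len(res)), carrying (res, index); i is always a nonnegative in-range
-- index, so Nat indexing with List.set / List.getD is exact here. Python's initial int 0
-- placeholders are modelled by "" — every slot is overwritten before the loop ends.
def manacherLoopA (arr : List String) : List Nat → List String × Nat → List String × Nat
  | [], st => st
  | i :: is, (res, index) =>
      if i % 2 == 0 then
        manacherLoopA arr is (res.set i "#", index)
      else
        manacherLoopA arr is (res.set i (arr.getD index ""), index + 1)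

def manacherstring (arr : List String) : List String :=
  (manacherLoopA arr (List.range (1 + 2 * arr.length))
    (List.replicate (1 + 2 * arr.length) "", 0)).1

-- ===== PORT B =====
-- port of Source B's slice assignment res[1::2] = arr: walk the prefilled buffer two slots at a
-- time, overwriting each odd slot with the next element of arr.
def setOddSlots : List String → List String → List String
  | a :: _ :: rest, y :: ys => a :: y :: setOddSlots rest ys
  | res, _ => res

def manacherstring_alt (arr : List String) : List String :=
  setOddSlots (List.replicate (1 + 2 * arr.length) "#") arr

-- ===== PRECONDITION & SPEC =====
def Spec_manacherstring (arr : List String) (out : List String) : Prop := out = manacherstring_alt arr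
instance (arr : List String) (out : List String) : Decidable (Spec_manacherstring arr out) := by unfold Spec_manacherstring; infer_instance

-- ===== CLAIM (what is proved, stated in full; the proofs are below) =====
def Claim_equal_manacherstring : Prop := ∀ (arr : List String), Dom_manacherstring arr → Spec_manacherstring arr (manacherstring arr)

-- ===== LEMMAS AND PROOFS =====

-- the common target value: "#" interleaved around the elements
def interleaved (arr : List String) : List String :=
  "#" :: arr.flatMap (fun y => [y, "#"])

lemma setOddSlots_replicate (arr : List String) :
    setOddSlots (List.replicate (1 + 2 * arr.length) "#") arr = interleaved arr := by
  induction arr with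
  | nil => simp [setOddSlots, interleaved]
  | cons y ys ih =>
      have h : 1 + 2 * (y :: ys).length = (1 + 2 * ys.length) + 1 + 1 := by
        simp [List.length_cons]; omega
      rw [h, List.replicate_succ, List.replicate_succ, setOddSlots, ih]
      simp [interleaved]

lemma getD_append_len (front : List String) (y : String) (ys : List String) :
    (front ++ y :: ys).getD front.length "" = y := by
  induction front with
  | nil => simp [List.getD]
  | cons a as ih => simp [List.getD]

lemma loopA_cons (arr : List String) (i : Nat) (is : List Nat) (res : List String) (index : Nat) :
    manacherLoopA arr (i :: is) (res, index)
      = if i % 2 == 0 then manacherLoopA arr is (res.set i "#", index)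
        else manacherLoopA arr is (res.set i (arr.getD index ""), index + 1) := rfl

lemma loopA_inv (arr : List String) :
    ∀ (ys front done pend : List String),
      arr = front ++ ys → done.length = 2 * front.length →
      pend.length = 2 * ys.length + 1 →
      manacherLoopA arr (List.range' done.length (2 * ys.length + 1))
          (done ++ pend, front.length)
        = (done ++ interleaved ys, arr.length) := by
  intro ys
  induction ys with
  | nil =>
      intro front done pend harr hd hp
      match pend, hp with
      | [p], _ =>
        have he : (done.length % 2 == 0) = true := by simp only [hd, beq_iff_eq]; omega
        have hs : (done ++ [p]).set done.length "#" = done ++ ["#"] := by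
          simp
        have hlen : arr.length = front.length := by simp [harr]
        simp [List.range'_succ, manacherLoopA, he, hs, interleaved, hlen]
  | cons y ys ih =>
      intro front done pend harr hd hp
      match pend, hp with
      | p0 :: p1 :: pend', hp =>
        have he : (done.length % 2 == 0) = true := by simp only [hd, beq_iff_eq]; omega
        have ho : ¬ (((done.length + 1) % 2 == 0) = true) := by
          simp only [hd, beq_iff_eq]; omega
        have hs0 : (done ++ p0 :: p1 :: pend').set done.length "#"
            = done ++ "#" :: p1 :: pend' := by
          simp
        have hget : arr.getD front.length "" = y := by
          rw [harr]; exact getD_append_len front y ys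
        -- range' d (2*(len ys +1)+1) = d :: (d+1) :: range' (d+2) (2*len ys + 1)
        have hr : List.range' done.length (2 * (y :: ys).length + 1)
            = done.length :: (done.length + 1) :: List.range' (done.length + 2) (2 * ys.length + 1) := by
          have : 2 * (y :: ys).length + 1 = (2 * ys.length + 1) + 1 + 1 := by
            simp [List.length_cons]; omega
          rw [this, List.range'_succ, List.range'_succ]
        have hs2 : (done ++ "#" :: p1 :: pend').set (done.length + 1) y
            = (done ++ ["#", y]) ++ pend' := by
          simp
        have harr' : arr = (front ++ [y]) ++ ys := by simp [harr]
        have hd' : (done ++ ["#", y]).length = 2 * (front ++ [y]).length := by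
          simp; omega
        have hp' : pend'.length = 2 * ys.length + 1 := by
          have := hp; simp [List.length_cons] at this ⊢; omega
        have hih := ih (front ++ [y]) (done ++ ["#", y]) pend' harr' hd' hp'
        rw [hr, loopA_cons, if_pos he, hs0, loopA_cons, if_neg ho, hget, hs2]
        rw [show done.length + 2 = (done ++ ["#", y]).length by simp,
            show front.length + 1 = (front ++ [y]).length by simp]
        rw [hih]
        simp [interleaved]

theorem manacherstring_spec : Claim_equal_manacherstring := by
  intro arr _
  unfold Spec_manacherstring manacherstring manacherstring_alt
  rw [setOddSlots_replicate]
  rw [show 1 + 2 * arr.length = 2 * arr.length + 1 by omega]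
  have h := loopA_inv arr arr [] [] (List.replicate (2 * arr.length + 1) "") (by simp) (by simp)
    (by simp)
  rw [List.range_eq_range']
  simp only [List.length_nil, List.nil_append] at h
  rw [h]
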